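-- pv_equiv track=rewrite | github.com/kkr010128/codebert | problem296/problem296_57.py | solve
-- ===== SOURCE A (Python) =====
-- def solve(S, K):
--     T = S * K
--     ans = 0
--     for i in range(len(T) - 1):
--         if T[i] == T[i + 1]:
--             ans += 1
--             T[i + 1] = "*"
--     return ans
-- ===== SOURCE B (Python) =====
-- def solve(S, K):
--     # Exact re-implementation: scan one period at a time with a carried
--     # "previous effective element" state; after the first period the state is
--     # eventually periodic with period <= 2, so extrapolate arithmetically.
--     if K <= 0 or not S:
--         return 0
--
--     def scan(prev, ans):
--         for x in S:
--             if prev == x: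
--                 ans += 1
--                 prev = "*"
--             else:
--                 prev = x
--         return prev, ans
--
--     p1, c1 = scan(None, 0)
--     if K == 1:
--         return c1
--     p2, c2 = scan(p1, c1)
--     if p2 == p1:
--         return c1 + (K - 1) * (c2 - c1)
--     p3, c3 = scan(p2, c2)
--     if p3 == p2:
--         return c2 + (K - 2) * (c3 - c2)
--     # period-2 cycle: states alternate p1, p2, p1, ...
--     d2, d3 = c2 - c1, c3 - c2
--     m = K - 1
--     return c1 + (m // 2) * (d2 + d3) + (m % 2) * d2
-- ===== Notes on version B (the rewrite author's own statement) =====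
-- stated objective: faster
-- what changed: Instead of materializing S*K and scanning all K copies with in-place '*' overwrites, B scans a single period at most three times carrying a 'previous effective element' state, detects the (period <= 2) cycle of that state, and extrapolates the count arithmetically over the remaining K copies.
import Mathlib
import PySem

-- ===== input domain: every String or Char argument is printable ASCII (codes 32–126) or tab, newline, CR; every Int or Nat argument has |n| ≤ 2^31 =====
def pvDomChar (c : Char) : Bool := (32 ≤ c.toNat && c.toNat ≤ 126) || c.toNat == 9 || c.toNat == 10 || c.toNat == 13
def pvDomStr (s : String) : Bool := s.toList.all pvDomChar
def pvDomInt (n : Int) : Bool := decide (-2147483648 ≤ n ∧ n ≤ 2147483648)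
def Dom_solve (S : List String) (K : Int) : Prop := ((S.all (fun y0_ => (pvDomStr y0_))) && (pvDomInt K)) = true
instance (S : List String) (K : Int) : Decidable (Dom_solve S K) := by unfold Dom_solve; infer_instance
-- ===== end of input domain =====

-- B replaces A's scan of the whole materialized list S*K by at most three scans
-- of one period plus arithmetic extrapolation of the periodic scan state (objective: faster).

-- ===== PORT A =====
-- Literal port of A: build T = S*K, then loop i in range(len(T)-1) comparing
-- T[i] with T[i+1] and overwriting T[i+1] with "*" on a match (i and i+1 are
-- always in range, so getD is exact here).
def solveBody (st : Int × Array String) (i : Int) : Int × Array String :=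
  if st.2.getD i.toNat "" = st.2.getD (i.toNat + 1) "" then
    (st.1 + 1, st.2.setIfInBounds (i.toNat + 1) "*")
  else st

def solve (S : List String) (K : Int) : Int :=
  let T := ((List.replicate K.toNat S).flatten).toArray
  ((PySem.List.pyRange 0 ((T.size : Int) - 1) 1).foldl solveBody (0, T)).1

-- ===== PORT B =====
-- One step of Source B's scan: compare the carried "previous effective element"
-- (none = Python's None at the very start) with the next element.
def scanStep (st : Option String × Int) (x : String) : Option String × Int :=
  if st.1 = some x then (some "*", st.2 + 1) else (some x, st.2)

-- Source B's scan(prev, ans): one pass over a single period S.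
def scanPeriod (S : List String) (prev : Option String) (ans : Int) : Option String × Int :=
  S.foldl scanStep (prev, ans)

def solve_alt (S : List String) (K : Int) : Int :=
  if K ≤ 0 ∨ S = [] then 0
  else
    let s1 := scanPeriod S none 0
    if K = 1 then s1.2
    else
      let s2 := scanPeriod S s1.1 s1.2
      if s2.1 = s1.1 then s1.2 + (K - 1) * (s2.2 - s1.2)
      else
        let s3 := scanPeriod S s2.1 s2.2
        if s3.1 = s2.1 then s2.2 + (K - 2) * (s3.2 - s2.2)
        else
          s1.2 + PySem.Int.floordiv (K - 1) 2 * ((s2.2 - s1.2) + (s3.2 - s2.2))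
               + PySem.Int.mod (K - 1) 2 * (s2.2 - s1.2)

-- ===== PRECONDITION & SPEC =====
def Spec_solve (S : List String) (K : Int) (out : Int) : Prop := out = solve_alt S K
instance (S : List String) (K : Int) (out : Int) : Decidable (Spec_solve S K out) := by unfold Spec_solve; infer_instance

-- ===== CLAIM (what is proved, stated in full; the proofs are below) =====
def Claim_equal_solve : Prop := ∀ (S : List String) (K : Int), Dom_solve S K → Spec_solve S K (solve S K)

-- ===== LEMMAS AND PROOFS =====

-- Proof-side model of solveBody over a plain list (the array is the list).
def solveBodyL (st : Int × List String) (i : Int) : Int × List String :=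
  if st.2.getD i.toNat "" = st.2.getD (i.toNat + 1) "" then
    (st.1 + 1, st.2.set (i.toNat + 1) "*")
  else st

theorem getD_toArray (l : List String) (i : Nat) (d : String) :
    l.toArray.getD i d = l.getD i d := by
  simp [Array.getD, List.getD]
  split
  · simp [*]
  · rw [List.getElem?_eq_none (by omega)]; rfl

theorem solveBody_toArray (ans : Int) (L : List String) (i : Int) :
    solveBody (ans, L.toArray) i
      = ((solveBodyL (ans, L) i).1, (solveBodyL (ans, L) i).2.toArray) := by
  simp only [solveBody, solveBodyL, getD_toArray]
  split <;> simp

theorem foldl_body_toArray (R : List Int) : ∀ (ans : Int) (L : List String),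
    (R.foldl solveBody (ans, L.toArray)).1 = (R.foldl solveBodyL (ans, L)).1 := by
  induction R with
  | nil => intro ans L; rfl
  | cons i R ih =>
    intro ans L
    simp only [List.foldl_cons, solveBody_toArray]
    exact ih _ _

-- k-fold application of one period scan, head-recursively.
def gIter (S : List String) : Nat → (Option String × Int) → Option String × Int
  | 0, st => st
  | n+1, st => gIter S n (scanPeriod S st.1 st.2)

theorem gIter_succ' (S : List String) (n : Nat) (st : Option String × Int) :
    gIter S (n+1) st = scanPeriod S (gIter S n st).1 (gIter S n st).2 := by
  induction n generalizing st with
  | zero => simp [gIter]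
  | succ n ih => rw [gIter, ih]; rfl

-- The count component of the scan is additive in its accumulator.
theorem foldl_scan_add (S : List String) (p : Option String) (a : Int) :
    List.foldl scanStep (p, a) S
      = ((List.foldl scanStep (p, 0) S).1, a + (List.foldl scanStep (p, 0) S).2) := by
  induction S generalizing p a with
  | nil => simp
  | cons x S ih =>
    simp only [List.foldl_cons]
    by_cases h : p = some x
    · have e1 : scanStep (p, a) x = (some "*", a + 1) := by simp [scanStep, h]
      have e2 : scanStep (p, 0) x = (some "*", 1) := by simp [scanStep, h]
      rw [e1, e2, ih (some "*") (a + 1), ih (some "*") 1]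
      exact Prod.ext rfl (by ring)
    · have e1 : scanStep (p, a) x = (some x, a) := by simp [scanStep, h]
      have e2 : scanStep (p, 0) x = (some x, 0) := by simp [scanStep, h]
      rw [e1, e2, ih (some x) a]

theorem scan_add (S : List String) (p : Option String) (a : Int) :
    scanPeriod S p a = ((scanPeriod S p 0).1, a + (scanPeriod S p 0).2) := by
  simpa [scanPeriod] using foldl_scan_add S p a

theorem scan_fst (S : List String) (p : Option String) (a : Int) :
    (scanPeriod S p a).1 = (scanPeriod S p 0).1 := by
  conv_lhs => rw [scan_add S p a]

theorem scan_snd (S : List String) (p : Option String) (a : Int) :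
    (scanPeriod S p 0).2 = (scanPeriod S p a).2 - a := by
  conv_rhs => rw [scan_add S p a]
  simp

-- After scanning a nonempty period, the state is its last element or "*".
theorem scan_last_or_star (S' : List String) (x : String) (st : Option String × Int) :
    (List.foldl scanStep st (S' ++ [x])).1 = some "*"
      ∨ (List.foldl scanStep st (S' ++ [x])).1 = some x := by
  rw [List.foldl_append]
  by_cases h : (List.foldl scanStep st S').1 = some x <;> simp [scanStep, h]

-- A's mutating index loop equals the clean state scan (invariant: at position
-- |pre| the loop sees 'cur' there and the untouched suffix after it).
theorem loop_eq (suf : List String) : ∀ (pre : List String) (cur : String) (ans : Int),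
    ((PySem.List.pyRange (pre.length : Int) ((pre.length : Int) + suf.length) 1).foldl
        solveBodyL (ans, pre ++ cur :: suf)).1
      = (List.foldl scanStep (some cur, ans) suf).2 := by
  induction suf with
  | nil =>
    intro pre cur ans
    rw [PySem.List.pyRange_one_eq_nil (by simp)]
    simp
  | cons x suf ih =>
    intro pre cur ans
    rw [PySem.List.pyRange_one_cons (by simp)]
    simp only [List.foldl_cons]
    have hget1 : (pre ++ cur :: x :: suf).getD pre.length "" = cur := by
      simp [List.getD]
    have hget2 : (pre ++ cur :: x :: suf).getD (pre.length + 1) "" = x := by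
      simp [List.getD]
    have hset : (pre ++ cur :: x :: suf).set (pre.length + 1) "*"
        = (pre ++ [cur]) ++ "*" :: suf := by
      rw [List.set_append_right _ _ (by simp)]
      simp
    have hstep : (pre.length : Int) + 1 = ((pre ++ [cur]).length : Int) := by simp
    have hrange : (pre.length : Int) + ((x :: suf).length : Int)
        = ((pre ++ [cur]).length : Int) + (suf.length : Int) := by simp; omega
    by_cases h : cur = x
    · have hb : solveBodyL (ans, pre ++ cur :: x :: suf) (pre.length : Int)
          = (ans + 1, (pre ++ [cur]) ++ "*" :: suf) := by
        simp only [solveBodyL, Int.toNat_natCast]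
        rw [hget1, hget2, if_pos h, hset]
      rw [hb, hstep, hrange, ih (pre ++ [cur]) "*" (ans + 1)]
      have hs : scanStep (some cur, ans) x = (some "*", ans + 1) := by simp [scanStep, h]
      rw [hs]
    · have hb : solveBodyL (ans, pre ++ cur :: x :: suf) (pre.length : Int)
          = (ans, (pre ++ [cur]) ++ x :: suf) := by
        simp only [solveBodyL, Int.toNat_natCast]
        rw [hget1, hget2, if_neg h]
        simp
      rw [hb, hstep, hrange, ih (pre ++ [cur]) x ans]
      have hs : scanStep (some cur, ans) x = (some x, ans) := by simp [scanStep, h]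
      rw [hs]

-- Scanning n concatenated copies of S is n iterated period scans.
theorem fold_flatten (S : List String) : ∀ (n : Nat) (st : Option String × Int),
    List.foldl scanStep st ((List.replicate n S).flatten) = gIter S n st := by
  intro n
  induction n with
  | zero => intro st; simp [gIter]
  | succ n ih =>
    intro st
    rw [List.replicate_succ, List.flatten_cons, List.foldl_append, gIter, ← ih]
    rfl

-- A equals the iterated clean scan.
theorem solve_eq_gIter (S : List String) (K : Int) :
    solve S K = (gIter S K.toNat (none, 0)).2 := by
  simp only [solve, List.size_toArray, foldl_body_toArray]
  rcases hT : (List.replicate K.toNat S).flatten with _ | ⟨cur, suf⟩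
  · rw [PySem.List.pyRange_one_eq_nil (by simp)]
    rw [← fold_flatten, hT]
    simp
  · have hlen : ((cur :: suf).length : Int) - 1
        = (([] : List String).length : Int) + (suf.length : Int) := by simp
    have hl := loop_eq suf [] cur 0
    simp only [List.nil_append, List.length_nil, Nat.cast_zero, zero_add] at hl
    simp only [List.length_nil, Nat.cast_zero, zero_add] at hlen ⊢
    rw [hlen, hl, ← fold_flatten, hT]
    have hcons : List.foldl scanStep (none, 0) (cur :: suf)
        = List.foldl scanStep (some cur, 0) suf := by
      simp [scanStep]
    rw [hcons]

-- Stable state: if one more period leaves the state unchanged, counts grow linearly.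
theorem gIter_stable (S : List String) (st : Option String × Int)
    (h : (scanPeriod S st.1 0).1 = st.1) :
    ∀ (k : Nat), gIter S k st = (st.1, st.2 + k * (scanPeriod S st.1 0).2) := by
  intro k
  induction k with
  | zero => simp [gIter]
  | succ k ih =>
    rw [gIter_succ', ih]
    rw [scan_add]
    simp only [h]
    exact Prod.ext rfl (by push_cast; ring)

-- Period-2 state cycle: counts grow by d2 + d3 every two periods.
theorem gIter_period2 (S : List String) (s1 s2 s3 : Option String × Int)
    (h1 : scanPeriod S none 0 = s1)
    (h2 : scanPeriod S s1.1 s1.2 = s2)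
    (h3 : scanPeriod S s2.1 s2.2 = s3)
    (h31 : s3.1 = s1.1) :
    ∀ (k : Nat),
      gIter S (2*k+1) (none, 0) = (s1.1, s1.2 + k * ((s2.2 - s1.2) + (s3.2 - s2.2)))
      ∧ gIter S (2*k+2) (none, 0) = (s2.1, s2.2 + k * ((s2.2 - s1.2) + (s3.2 - s2.2))) := by
  have hq2 : (scanPeriod S s1.1 0).1 = s2.1 := by rw [← scan_fst S s1.1 s1.2, h2]
  have hd2 : (scanPeriod S s1.1 0).2 = s2.2 - s1.2 := by rw [scan_snd S s1.1 s1.2, h2]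
  have hq3 : (scanPeriod S s2.1 0).1 = s3.1 := by rw [← scan_fst S s2.1 s2.2, h3]
  have hd3 : (scanPeriod S s2.1 0).2 = s3.2 - s2.2 := by rw [scan_snd S s2.1 s2.2, h3]
  have hg1 : gIter S 1 (none, 0) = s1 := by rw [gIter_succ']; simpa [gIter] using h1
  intro k
  induction k with
  | zero =>
    refine ⟨by simpa using hg1, ?_⟩
    show gIter S (1+1) (none, 0) = _
    rw [gIter_succ', hg1, h2]
    simp
  | succ k ih =>
    obtain ⟨iho, ihe⟩ := ih
    have step1 : gIter S (2*(k+1)+1) (none, 0)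
        = (s1.1, s1.2 + ((k:Int)+1) * ((s2.2 - s1.2) + (s3.2 - s2.2))) := by
      have e : 2*(k+1)+1 = (2*k+2) + 1 := by ring
      rw [e, gIter_succ', ihe]
      rw [scan_add, hq3, hd3, h31]
      exact Prod.ext rfl (by push_cast; ring)
    refine ⟨by simpa using step1, ?_⟩
    have e : 2*(k+1)+2 = (2*(k+1)+1) + 1 := by ring
    rw [e, gIter_succ', step1]
    rw [scan_add, hq2, hd2]
    exact Prod.ext rfl (by push_cast; ring)

-- ===== VERDICT (by name: the statement is the Claim_ definition above) =====
theorem solve_spec : Claim_equal_solve := by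
  intro S K _
  unfold Spec_solve
  rw [solve_eq_gIter]
  simp only [solve_alt]
  by_cases h0 : K ≤ 0 ∨ S = []
  · rw [if_pos h0]
    rcases h0 with h | h
    · rw [Int.toNat_of_nonpos h]; rfl
    · subst h
      have hz : ∀ n, gIter ([] : List String) n (none, 0) = (none, 0) := by
        intro n
        induction n with
        | zero => rfl
        | succ n ih => rw [gIter_succ', ih]; rfl
      rw [hz]
  · rw [if_neg h0]
    push Not at h0
    obtain ⟨hK, hS⟩ := h0
    by_cases h1 : K = 1
    · rw [if_pos h1, h1]
      show (gIter S 1 (none, 0)).2 = _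
      rw [gIter_succ']
      simp [gIter]
    · rw [if_neg h1]
      have hK2 : 2 ≤ K := by omega
      have hq2 := scan_fst S (scanPeriod S none 0).1 (scanPeriod S none 0).2
      have hd2 := scan_snd S (scanPeriod S none 0).1 (scanPeriod S none 0).2
      by_cases h21 : (scanPeriod S (scanPeriod S none 0).1 (scanPeriod S none 0).2).1
          = (scanPeriod S none 0).1
      · rw [if_pos h21]
        obtain ⟨k, hk⟩ : ∃ k, K.toNat = k + 1 := ⟨K.toNat - 1, by omega⟩
        rw [hk]
        have hunf : gIter S (k+1) (none, 0) = gIter S k (scanPeriod S none 0) := rfl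
        rw [hunf, gIter_stable S (scanPeriod S none 0) (by rw [← hq2, h21]) k]
        have hkc : ((k : Nat) : Int) = K - 1 := by omega
        rw [hd2]
        simp only [hkc]
      · rw [if_neg h21]
        have hq3 := scan_fst S (scanPeriod S (scanPeriod S none 0).1 (scanPeriod S none 0).2).1
          (scanPeriod S (scanPeriod S none 0).1 (scanPeriod S none 0).2).2
        have hd3 := scan_snd S (scanPeriod S (scanPeriod S none 0).1 (scanPeriod S none 0).2).1
          (scanPeriod S (scanPeriod S none 0).1 (scanPeriod S none 0).2).2
        by_cases h32 : (scanPeriod S (scanPeriod S (scanPeriod S none 0).1 (scanPeriod S none 0).2).1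
              (scanPeriod S (scanPeriod S none 0).1 (scanPeriod S none 0).2).2).1
            = (scanPeriod S (scanPeriod S none 0).1 (scanPeriod S none 0).2).1
        · rw [if_pos h32]
          obtain ⟨k, hk⟩ : ∃ k, K.toNat = k + 2 := ⟨K.toNat - 2, by omega⟩
          rw [hk]
          have hunf : gIter S (k+2) (none, 0)
              = gIter S k (scanPeriod S (scanPeriod S none 0).1 (scanPeriod S none 0).2) := rfl
          rw [hunf, gIter_stable S _ (by rw [← hq3, h32]) k]
          have hkc : ((k : Nat) : Int) = K - 2 := by omega
          rw [hd3]
          simp only [hkc]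
        · rw [if_neg h32]
          -- the three states all lie in {some "*", some (last S)}; distinctness forces a 2-cycle
          rcases List.eq_nil_or_concat S with h | ⟨S', x, hSx⟩
          · exact absurd h hS
          have r1 := scan_last_or_star S' x ((none : Option String), (0 : Int))
          have r2 := scan_last_or_star S' x ((scanPeriod S none 0).1, (scanPeriod S none 0).2)
          have r3 := scan_last_or_star S' x
            ((scanPeriod S (scanPeriod S none 0).1 (scanPeriod S none 0).2).1,
             (scanPeriod S (scanPeriod S none 0).1 (scanPeriod S none 0).2).2)
          have hSx' : S = S' ++ [x] := by simpa using hSx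
          rw [← hSx'] at r1 r2 r3
          have r1' : (scanPeriod S none 0).1 = some "*" ∨ (scanPeriod S none 0).1 = some x := r1
          have r2' : (scanPeriod S (scanPeriod S none 0).1 (scanPeriod S none 0).2).1 = some "*"
              ∨ (scanPeriod S (scanPeriod S none 0).1 (scanPeriod S none 0).2).1 = some x := r2
          have r3' : (scanPeriod S (scanPeriod S (scanPeriod S none 0).1 (scanPeriod S none 0).2).1
                (scanPeriod S (scanPeriod S none 0).1 (scanPeriod S none 0).2).2).1 = some "*"
              ∨ (scanPeriod S (scanPeriod S (scanPeriod S none 0).1 (scanPeriod S none 0).2).1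
                (scanPeriod S (scanPeriod S none 0).1 (scanPeriod S none 0).2).2).1 = some x := r3
          have h31 : (scanPeriod S (scanPeriod S (scanPeriod S none 0).1 (scanPeriod S none 0).2).1
                (scanPeriod S (scanPeriod S none 0).1 (scanPeriod S none 0).2).2).1
              = (scanPeriod S none 0).1 := by
            rcases r1' with r1' | r1' <;> rcases r2' with r2' | r2' <;> rcases r3' with r3' | r3' <;>
              first
                | exact r3'.trans r1'.symm
                | exact absurd (r2'.trans r1'.symm) h21
                | exact absurd (r3'.trans r2'.symm) h32
          have hper := gIter_period2 S (scanPeriod S none 0)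
            (scanPeriod S (scanPeriod S none 0).1 (scanPeriod S none 0).2)
            (scanPeriod S (scanPeriod S (scanPeriod S none 0).1 (scanPeriod S none 0).2).1
              (scanPeriod S (scanPeriod S none 0).1 (scanPeriod S none 0).2).2)
            rfl rfl rfl h31
          have hfd : PySem.Int.floordiv (K - 1) 2 = (K - 1) / 2 :=
            PySem.Int.floordiv_eq_ediv_of_pos (by norm_num)
          have hmd : PySem.Int.mod (K - 1) 2 = (K - 1) % 2 :=
            PySem.Int.mod_eq_emod_of_pos (by norm_num)
          obtain ⟨k, hk⟩ : ∃ k, K.toNat = 2*k + 1 ∨ K.toNat = 2*k + 2 :=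
            ⟨(K.toNat - 1) / 2, by omega⟩
          rcases hk with hk | hk
          · rw [hk, (hper k).1]
            have e1 : (K - 1) / 2 = (k : Int) := by omega
            have e2 : (K - 1) % 2 = 0 := by omega
            rw [hfd, hmd, e1, e2]
            simp only
            ring
          · rw [hk, (hper k).2]
            have e1 : (K - 1) / 2 = (k : Int) := by omega
            have e2 : (K - 1) % 2 = 1 := by omega
            rw [hfd, hmd, e1, e2]
            simp only
            ring
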